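-- pv_equiv track=rewrite | github.com/eldor-fozilov/solving-algorithms-and-data-structures-problems- | easy problems/class_photos/class_photos.py | classPhotos
-- ===== SOURCE A (Python) =====
-- def classPhotos(redShirtHeights, blueShirtHeights):
--
--     redShirtHeights.sort()
--     blueShirtHeights.sort()
--
--     reds_high_count = blues_high_count = 0
--
--     for i in range(len(redShirtHeights)):
--         if redShirtHeights[i] > blueShirtHeights[i]:
--             reds_high_count += 1
--         elif redShirtHeights[i] == blueShirtHeights[i]:
--             return False
--         else:
--             blues_high_count += 1
--
--     if reds_high_count == len(redShirtHeights) or blues_high_count == len(blueShirtHeights):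
--         return True
--
--     return False
-- ===== SOURCE B (Python) =====
-- def classPhotos(redShirtHeights, blueShirtHeights):
--     redShirtHeights.sort()
--     blueShirtHeights.sort()
--
--     def dominates(tall, short):
--         # every k-th person in `tall` must have strictly more than k people
--         # of `short` below them: walk `short` once with a rank pointer
--         j = 0
--         for i in range(len(tall)):
--             v = tall[i]
--             while j < len(short) and short[j] < v:
--                 j += 1
--             if j < i + 1:
--                 return False
--         return True
--
--     return dominates(redShirtHeights, blueShirtHeights) or dominates(blueShirtHeights, redShirtHeights)
-- ===== Notes on version B (the rewrite author's own statement) =====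
-- stated objective: alternative
-- what changed: Replaces A's positional pairwise comparison with two maintained counters by an order-statistics test: a helper walks the other sorted list once with a monotone rank pointer and checks that the k-th person has strictly more than k people of the other colour below them, applied symmetrically in both directions.
-- outside the precondition, e.g. on classPhotos([1, 1, 5], [1, 2]): A returns False, B returns False
import Mathlib
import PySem

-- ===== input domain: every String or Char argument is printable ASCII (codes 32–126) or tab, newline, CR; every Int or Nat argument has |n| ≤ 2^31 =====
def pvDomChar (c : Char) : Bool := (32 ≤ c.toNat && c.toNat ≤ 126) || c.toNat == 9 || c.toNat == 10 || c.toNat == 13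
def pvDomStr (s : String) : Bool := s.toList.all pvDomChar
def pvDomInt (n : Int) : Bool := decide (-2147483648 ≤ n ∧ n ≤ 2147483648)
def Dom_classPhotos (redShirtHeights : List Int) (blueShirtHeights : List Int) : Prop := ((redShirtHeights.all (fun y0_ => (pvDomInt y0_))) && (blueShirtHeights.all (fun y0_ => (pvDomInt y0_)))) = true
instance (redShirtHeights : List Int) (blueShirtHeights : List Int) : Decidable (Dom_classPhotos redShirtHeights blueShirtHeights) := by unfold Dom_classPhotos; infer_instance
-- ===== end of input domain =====

-- B replaces A's positional pairwise comparison with counters by an order-statistics test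
-- (a rank pointer counting, for each person, how many of the other colour stand strictly
-- below them), applied in both directions (objective: alternative). Both A and B sort the
-- two argument lists in place; the equivalence proved here is about the return value.

-- ===== PORT A =====
-- the for-loop over range(len(redShirtHeights)) with the two counters and the early return
def classPhotosGo (r b : List Int) (n : Nat) (i rh bh : Nat) : Nat → Bool
  | 0 => decide (rh = r.length ∨ bh = b.length)
  | fuel + 1 =>
    if i < n then
      let rv := PySem.List.pyGetD r (i : Int) 0
      let bv := PySem.List.pyGetD b (i : Int) 0
      if rv > bv then classPhotosGo r b n (i + 1) (rh + 1) bh fuel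
      else if rv = bv then false
      else classPhotosGo r b n (i + 1) rh (bh + 1) fuel
    else decide (rh = r.length ∨ bh = b.length)

def classPhotos (redShirtHeights : List Int) (blueShirtHeights : List Int) : Bool :=
  let r := PySem.List.sorted redShirtHeights (fun x => x) false
  let b := PySem.List.sorted blueShirtHeights (fun x => x) false
  classPhotosGo r b r.length 0 0 0 r.length

-- ===== PORT B =====
-- the inner 'while j < len(short) and short[j] < v: j += 1' of B's helper
def dominatesAdv (short : List Int) (v : Int) (j : Nat) : Nat :=
  if j < short.length then
    if short.getD j 0 < v then dominatesAdv short v (j + 1) else j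
  else j
termination_by short.length - j
decreasing_by omega

-- B's 'for i in range(len(tall))' loop with the rank pointer j and the early return
def dominatesGo (tall short : List Int) (i j : Nat) : Bool :=
  if i < tall.length then
    let v := tall.getD i 0
    let j' := dominatesAdv short v j
    if j' < i + 1 then false
    else dominatesGo tall short (i + 1) j'
  else true
termination_by tall.length - i
decreasing_by omega

def dominates (tall short : List Int) : Bool := dominatesGo tall short 0 0

def classPhotos_alt (redShirtHeights : List Int) (blueShirtHeights : List Int) : Bool :=
  let r := PySem.List.sorted redShirtHeights (fun x => x) false
  let b := PySem.List.sorted blueShirtHeights (fun x => x) false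
  dominates r b || dominates b r

-- ===== PRECONDITION & SPEC =====
-- Pre_ excludes the inputs where the red list is longer than the blue list: there A in general
-- raises IndexError (it indexes blueShirtHeights at every index of redShirtHeights); the few
-- such inputs where a tie makes A return False before reaching the out-of-range index are
-- excluded with the rest (A and B both return False on the cited example).
def Pre_classPhotos (redShirtHeights : List Int) (blueShirtHeights : List Int) : Prop :=
  redShirtHeights.length ≤ blueShirtHeights.length
instance (redShirtHeights : List Int) (blueShirtHeights : List Int) : Decidable (Pre_classPhotos redShirtHeights blueShirtHeights) := by unfold Pre_classPhotos; infer_instance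
def pvWitness_classPhotos : List Int × List Int := ([3, 1, 2], [2, 4, 1])

def Spec_classPhotos (redShirtHeights : List Int) (blueShirtHeights : List Int) (out : Bool) : Prop := out = classPhotos_alt redShirtHeights blueShirtHeights
instance (redShirtHeights : List Int) (blueShirtHeights : List Int) (out : Bool) : Decidable (Spec_classPhotos redShirtHeights blueShirtHeights out) := by unfold Spec_classPhotos; infer_instance

-- ===== CLAIM (what is proved, stated in full; the proofs are below) =====
def Claim_equal_classPhotos : Prop := ∀ (redShirtHeights : List Int) (blueShirtHeights : List Int), Dom_classPhotos redShirtHeights blueShirtHeights → Pre_classPhotos redShirtHeights blueShirtHeights → Spec_classPhotos redShirtHeights blueShirtHeights (classPhotos redShirtHeights blueShirtHeights)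

-- ===== LEMMAS AND PROOFS =====

-- A's loop characterisation: with r no longer than b, the loop started at index i returns
-- false if any tie occurs from position i on, else compares the completed counters against
-- the two list lengths.
lemma classPhotosGo_eq (r b : List Int) (hlen : r.length ≤ b.length) :
    ∀ k i rh bh, r.length ≤ i + k →
    classPhotosGo r b r.length i rh bh k =
      (let t := (r.zip b).drop i
       if t.any (fun p => decide (p.1 = p.2)) then false
       else decide (rh + t.countP (fun p => decide (p.2 < p.1)) = r.length ∨
                    bh + t.countP (fun p => decide (p.1 < p.2)) = b.length)) := by
  intro k
  induction k with
  | zero =>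
    intro i rh bh hk
    have hdrop : (r.zip b).drop i = [] := by
      apply List.drop_eq_nil_of_le
      rw [List.length_zip]
      omega
    rw [classPhotosGo]
    simp [hdrop]
  | succ k ih =>
    intro i rh bh hk
    by_cases hi : i < r.length
    case neg =>
      have hdrop : (r.zip b).drop i = [] := by
        apply List.drop_eq_nil_of_le
        rw [List.length_zip]
        omega
      rw [classPhotosGo, if_neg hi]
      simp [hdrop]
    have hib : i < b.length := by omega
    have hiz : i < (r.zip b).length := by simp [List.length_zip]; omega
    have hdrop : (r.zip b).drop i = (r.zip b)[i] :: (r.zip b).drop (i + 1) :=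
      List.drop_eq_getElem_cons hiz
    have hget : (r.zip b)[i] = (r[i], b[i]) := List.getElem_zip
    have hrv : PySem.List.pyGetD r (i : Int) 0 = r[i] := PySem.List.pyGetD_ofNat r i 0 hi
    have hbv : PySem.List.pyGetD b (i : Int) 0 = b[i] := PySem.List.pyGetD_ofNat b i 0 hib
    rw [classPhotosGo, if_pos hi]
    simp only [hrv, hbv, hdrop, hget]
    by_cases h1 : b[i] < r[i]
    · rw [if_pos h1, ih (i + 1) (rh + 1) bh (by omega)]
      have hne : ¬ (r[i] = b[i]) := by omega
      have hnlt : ¬ (r[i] < b[i]) := by omega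
      simp only [List.any_cons, List.countP_cons, hne, hnlt, h1]
      simp only [decide_false, decide_true, Bool.false_or, Bool.false_eq_true,
        if_false, if_true, Nat.add_zero]
      split
      · rfl
      · simp only [decide_eq_decide]; omega
    · rw [if_neg (by exact h1)]
      by_cases h2 : r[i] = b[i]
      · rw [if_pos h2]
        simp [h2]
      · have h3 : r[i] < b[i] := by omega
        rw [if_neg h2, ih (i + 1) rh (bh + 1) (by omega)]
        simp only [List.any_cons, List.countP_cons, h1, h2, h3]
        simp only [decide_false, decide_true, Bool.false_or, Bool.false_eq_true,
          if_false, if_true, Nat.add_zero]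
        split
        · rfl
        · simp only [decide_eq_decide]; omega

-- an all-scan over a zip, read index-wise
lemma zip_all_iff_getD (x y : List Int) (f : Int → Int → Bool)
    (hxy : x.length ≤ y.length) :
    ((x.zip y).all (fun q => f q.1 q.2) = true) ↔
    ∀ k, k < x.length → f (x.getD k 0) (y.getD k 0) = true := by
  rw [List.all_eq_true]
  constructor
  · intro h k hk
    have hkz : k < (x.zip y).length := by simp [List.length_zip]; omega
    have := h (x.zip y)[k] (List.getElem_mem hkz)
    rw [List.getElem_zip] at this
    rw [List.getD_eq_getElem x 0 hk, List.getD_eq_getElem y 0 (by omega)]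
    exact this
  · intro h q hq
    obtain ⟨k, hkz, hqe⟩ := List.mem_iff_getElem.mp hq
    have hk : k < x.length := by simp [List.length_zip] at hkz; omega
    have := h k hk
    rw [List.getD_eq_getElem x 0 hk, List.getD_eq_getElem y 0 (by omega)] at this
    rw [← hqe, List.getElem_zip]
    exact this

-- in a ≤-sorted list, position k holds a value < v iff at least k+1 elements are < v
lemma sorted_getD_lt_iff (s : List Int) (hs : s.Pairwise (· ≤ ·)) (v : Int) :
    ∀ k, k < s.length →
    (s.getD k 0 < v ↔ k + 1 ≤ s.countP (fun x => decide (x < v))) := by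
  induction s with
  | nil => intro k hk; simp at hk
  | cons a t ih =>
    rw [List.pairwise_cons] at hs
    obtain ⟨ha, ht⟩ := hs
    intro k hk
    cases k with
    | zero =>
      simp only [List.getD_cons_zero, List.countP_cons]
      constructor
      · intro h; simp [h]
      · intro h
        by_contra hav
        have h0 : t.countP (fun x => decide (x < v)) = 0 := by
          rw [List.countP_eq_zero]
          intro x hx
          have := ha x hx
          simp
          omega
        simp [h0, show ¬ (a < v) by omega] at h
    | succ k =>
      simp only [List.getD_cons_succ, List.countP_cons]
      have hk' : k < t.length := by simp at hk; omega
      rw [ih ht k hk']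
      by_cases hav : a < v
      · simp [hav]
      · have h0 : t.countP (fun x => decide (x < v)) = 0 := by
          rw [List.countP_eq_zero]
          intro x hx
          have := ha x hx
          simp
          omega
        rw [h0]
        simp [hav]

-- counting elements below a threshold is monotone in the threshold
lemma countLt_mono (s : List Int) (v w : Int) (hvw : v ≤ w) :
    s.countP (fun x => decide (x < v)) ≤ s.countP (fun x => decide (x < w)) := by
  apply List.countP_mono_left
  intro x _ hx
  simp at hx ⊢
  omega

-- B's while-loop advances the rank pointer exactly to the count of elements below v
lemma dominatesAdv_eq (s : List Int) (hs : s.Pairwise (· ≤ ·)) (v : Int) :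
    ∀ fuel j, s.length - j ≤ fuel → j ≤ s.countP (fun x => decide (x < v)) →
    dominatesAdv s v j = s.countP (fun x => decide (x < v)) := by
  intro fuel
  induction fuel with
  | zero =>
    intro j hf hj
    have hle : s.countP (fun x => decide (x < v)) ≤ s.length := List.countP_le_length
    rw [dominatesAdv, if_neg (by omega)]
    omega
  | succ fuel ih =>
    intro j hf hj
    have hle : s.countP (fun x => decide (x < v)) ≤ s.length := List.countP_le_length
    by_cases hjl : j < s.length
    · rw [dominatesAdv, if_pos hjl]
      by_cases hlt : s.getD j 0 < v
      · rw [if_pos hlt]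
        have := (sorted_getD_lt_iff s hs v j hjl).mp hlt
        exact ih (j + 1) (by omega) (by omega)
      · rw [if_neg hlt]
        have := (sorted_getD_lt_iff s hs v j hjl).not.mp hlt
        omega
    · rw [dominatesAdv, if_neg hjl]
      omega

-- B's outer loop, characterised: every remaining index k needs k+1 elements of short below tall[k]
lemma dominatesGo_eq (tall short : List Int) (ht : tall.Pairwise (· ≤ ·))
    (hs : short.Pairwise (· ≤ ·)) :
    ∀ fuel i j, tall.length - i ≤ fuel →
    (i < tall.length → j ≤ short.countP (fun x => decide (x < tall.getD i 0))) →
    dominatesGo tall short i j =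
      decide (∀ k, k < tall.length → i ≤ k →
        k + 1 ≤ short.countP (fun x => decide (x < tall.getD k 0))) := by
  intro fuel
  induction fuel with
  | zero =>
    intro i j hf hj
    rw [dominatesGo, if_neg (by omega)]
    symm
    apply decide_eq_true
    intro k hk hik
    omega
  | succ fuel ih =>
    intro i j hf hj
    by_cases hi : i < tall.length
    · rw [dominatesGo, if_pos hi]
      simp only
      rw [dominatesAdv_eq short hs (tall.getD i 0) short.length j (by omega) (hj hi)]
      set c := short.countP (fun x => decide (x < tall.getD i 0)) with hc
      by_cases hfail : c < i + 1
      · rw [if_pos hfail]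
        symm
        apply decide_eq_false
        intro hall
        have := hall i hi (le_refl i)
        omega
      · rw [if_neg hfail]
        have hmono : i + 1 < tall.length →
            c ≤ short.countP (fun x => decide (x < tall.getD (i + 1) 0)) := by
          intro hi1
          apply countLt_mono
          rw [List.getD_eq_getElem tall 0 hi, List.getD_eq_getElem tall 0 hi1]
          exact List.pairwise_iff_getElem.mp ht i (i + 1) hi hi1 (by omega)
        rw [ih (i + 1) c (by omega) hmono]
        rw [decide_eq_decide]
        constructor
        · intro h k hk hik
          rcases Nat.lt_or_ge i k with hlt | hge
          · exact h k hk (by omega)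
          · have : k = i := by omega
            subst this
            omega
        · intro h k hk hik
          exact h k hk (by omega)
    · rw [dominatesGo, if_neg hi]
      symm
      apply decide_eq_true
      intro k hk hik
      omega

-- the dominance test, in closed form over sorted lists
lemma dominates_eq (tall short : List Int) (ht : tall.Pairwise (· ≤ ·))
    (hs : short.Pairwise (· ≤ ·)) :
    dominates tall short =
      decide (∀ k, k < tall.length →
        k < short.length ∧ short.getD k 0 < tall.getD k 0) := by
  unfold dominates
  rw [dominatesGo_eq tall short ht hs tall.length 0 0 (by omega) (fun _ => Nat.zero_le _)]
  rw [decide_eq_decide]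
  constructor
  · intro h k hk
    have := h k hk (Nat.zero_le k)
    have hcle : short.countP (fun x => decide (x < tall.getD k 0)) ≤ short.length :=
      List.countP_le_length
    have hks : k < short.length := by omega
    exact ⟨hks, (sorted_getD_lt_iff short hs (tall.getD k 0) k hks).mpr this⟩
  · intro h k hk _
    obtain ⟨hks, hlt⟩ := h k hk
    exact (sorted_getD_lt_iff short hs (tall.getD k 0) k hks).mp hlt

-- ===== VERDICT (by name: the statement is the Claim_ definition above) =====
theorem classPhotos_spec : Claim_equal_classPhotos := by
  intro red blue _hdom hpre
  unfold Pre_classPhotos at hpre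
  unfold Spec_classPhotos classPhotos classPhotos_alt
  set r := PySem.List.sorted red (fun x => x) false with hrdef
  set b := PySem.List.sorted blue (fun x => x) false with hbdef
  have hrp : r.Pairwise (· ≤ ·) := PySem.List.sorted_pairwise red (fun x => x)
  have hbp : b.Pairwise (· ≤ ·) := PySem.List.sorted_pairwise blue (fun x => x)
  have hrl : r.length = red.length := PySem.List.length_sorted red (fun x => x) false
  have hbl : b.length = blue.length := PySem.List.length_sorted blue (fun x => x) false
  have hlen : r.length ≤ b.length := by omega
  have hz : (r.zip b).length = r.length := by simp [List.length_zip]; omega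
  rw [classPhotosGo_eq r b hlen r.length 0 0 0 (by omega)]
  simp only [List.drop_zero, Nat.zero_add]
  rw [dominates_eq r b hrp hbp, dominates_eq b r hbp hrp]
  -- name the two pairwise-dominance facts
  have hgt : ((r.zip b).countP (fun p => decide (p.2 < p.1)) = r.length) ↔
      (∀ k, k < r.length → b.getD k 0 < r.getD k 0) := by
    constructor
    · intro h k hk
      have hall : (r.zip b).countP (fun p => decide (p.2 < p.1)) = (r.zip b).length := by omega
      have := (zip_all_iff_getD r b (fun a c => decide (c < a)) hlen).mp
        (List.all_eq_true.mpr (List.countP_eq_length.mp hall)) k hk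
      exact of_decide_eq_true this
    · intro h
      have := List.countP_eq_length.mpr (List.all_eq_true.mp
        ((zip_all_iff_getD r b (fun a c => decide (c < a)) hlen).mpr
          (fun k hk => decide_eq_true (h k hk))))
      omega
  have hltc : ((r.zip b).countP (fun p => decide (p.1 < p.2)) = b.length) ↔
      (r.length = b.length ∧ ∀ k, k < r.length → r.getD k 0 < b.getD k 0) := by
    have hcle : (r.zip b).countP (fun p => decide (p.1 < p.2)) ≤ (r.zip b).length :=
      List.countP_le_length
    constructor
    · intro h
      have heq : r.length = b.length := by omega
      refine ⟨heq, ?_⟩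
      intro k hk
      have hall : (r.zip b).countP (fun p => decide (p.1 < p.2)) = (r.zip b).length := by omega
      have := (zip_all_iff_getD r b (fun a c => decide (a < c)) hlen).mp
        (List.all_eq_true.mpr (List.countP_eq_length.mp hall)) k hk
      exact of_decide_eq_true this
    · rintro ⟨heq, h⟩
      have : (r.zip b).countP (fun p => decide (p.1 < p.2)) = (r.zip b).length :=
        List.countP_eq_length.mpr (List.all_eq_true.mp
          ((zip_all_iff_getD r b (fun a c => decide (a < c)) hlen).mpr
            (fun k hk => decide_eq_true (h k hk))))
      omega
  by_cases htie : (r.zip b).any (fun p => decide (p.1 = p.2))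
  · rw [if_pos htie]
    obtain ⟨p, hp, hpe⟩ := List.any_eq_true.mp htie
    have hpe' : p.1 = p.2 := of_decide_eq_true hpe
    obtain ⟨k, hkz, hqe⟩ := List.mem_iff_getElem.mp hp
    have hk : k < r.length := by omega
    have hkb : k < b.length := by omega
    have hrbk : r.getD k 0 = b.getD k 0 := by
      rw [List.getD_eq_getElem r 0 hk, List.getD_eq_getElem b 0 hkb]
      have hget : (r.zip b)[k] = (r[k], b[k]) := List.getElem_zip
      rw [hqe] at hget
      rw [hget] at hpe'
      simpa using hpe'
    symm
    rw [Bool.or_eq_false_iff]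
    constructor
    · apply decide_eq_false
      intro h
      have := (h k hk).2
      omega
    · apply decide_eq_false
      intro h
      have := (h k (by omega)).2
      omega
  · rw [if_neg htie]
    rcases Nat.lt_or_ge r.length b.length with hmlt | hge
    · -- red strictly shorter: blue can never dominate (index r.length fails), and
      -- the blue counter can never reach b.length either
      have hbd : decide (∀ k, k < b.length → k < r.length ∧ r.getD k 0 < b.getD k 0) = false := by
        apply decide_eq_false
        intro h
        have := (h r.length (by omega)).1
        omega
      have hcle : (r.zip b).countP (fun p => decide (p.1 < p.2)) ≤ (r.zip b).length :=
        List.countP_le_length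
      rw [hbd, Bool.or_false]
      rw [decide_eq_decide]
      constructor
      · rintro (h | h)
        · intro k hk
          exact ⟨by omega, hgt.mp h k hk⟩
        · omega
      · intro h
        left
        exact hgt.mpr (fun k hk => (h k hk).2)
    · have heq : r.length = b.length := by omega
      rcases hg : decide (∀ k, k < r.length → k < b.length ∧ b.getD k 0 < r.getD k 0) with _ | _
      · rcases hl : decide (∀ k, k < b.length → k < r.length ∧ r.getD k 0 < b.getD k 0) with _ | _
        · simp only [Bool.or_false]
          apply decide_eq_false
          rintro (h | h)
          · have := of_decide_eq_false hg
            exact this (fun k hk => ⟨by omega, hgt.mp h k hk⟩)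
          · have := of_decide_eq_false hl
            obtain ⟨_, h2⟩ := hltc.mp h
            exact this (fun k hk => ⟨by omega, h2 k (by omega)⟩)
        · simp only [Bool.or_true]
          apply decide_eq_true
          right
          apply hltc.mpr
          refine ⟨heq, ?_⟩
          intro k hk
          exact (of_decide_eq_true hl k (by omega)).2
      · simp only [Bool.true_or]
        apply decide_eq_true
        left
        apply hgt.mpr
        intro k hk
        exact (of_decide_eq_true hg k hk).2
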